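-- pv_equiv track=rewrite | github.com/Aslan7197/enhancedPatchOptimization | libs/components/patch_optimizer.py | get_top_ks
-- ===== SOURCE A (Python) =====
-- def get_top_ks(nc: int, num_candidate_patches: int, combination_patch_max: int):
--     ks = []
--
--     for patch_index in range(1, num_candidate_patches + 1):
--         if (patch_index ** nc) <= combination_patch_max:
--             ks.append(patch_index)
--         else:
--             break
--
--     top_k = max(ks)
--
--     return [top_k for _ in range(nc)]
-- ===== SOURCE B (Python) =====
-- def get_top_ks(nc: int, num_candidate_patches: int, combination_patch_max: int):
--     def fits(base):
--         # is base ** nc <= combination_patch_max, without building huge powers: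
--         # multiply step by step and stop as soon as the limit is exceeded.
--         if base == 1:
--             return 1 <= combination_patch_max
--         r = 1
--         for _ in range(nc):
--             r *= base
--             if r > combination_patch_max:
--                 return False
--         return True
--
--     lo, hi = 1, num_candidate_patches
--     while lo < hi:
--         mid = (lo + hi + 1) // 2
--         if fits(mid):
--             lo = mid
--         else:
--             hi = mid - 1
--     return [lo] * nc
-- ===== Notes on version B (the rewrite author's own statement) =====
-- stated objective: faster
-- what changed: Replaces the linear scan over all candidate patch indices (one full exponentiation each) by a binary search over the monotone predicate k**nc <= limit, with an early-abort repeated-multiplication test instead of a full power.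
import Mathlib
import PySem

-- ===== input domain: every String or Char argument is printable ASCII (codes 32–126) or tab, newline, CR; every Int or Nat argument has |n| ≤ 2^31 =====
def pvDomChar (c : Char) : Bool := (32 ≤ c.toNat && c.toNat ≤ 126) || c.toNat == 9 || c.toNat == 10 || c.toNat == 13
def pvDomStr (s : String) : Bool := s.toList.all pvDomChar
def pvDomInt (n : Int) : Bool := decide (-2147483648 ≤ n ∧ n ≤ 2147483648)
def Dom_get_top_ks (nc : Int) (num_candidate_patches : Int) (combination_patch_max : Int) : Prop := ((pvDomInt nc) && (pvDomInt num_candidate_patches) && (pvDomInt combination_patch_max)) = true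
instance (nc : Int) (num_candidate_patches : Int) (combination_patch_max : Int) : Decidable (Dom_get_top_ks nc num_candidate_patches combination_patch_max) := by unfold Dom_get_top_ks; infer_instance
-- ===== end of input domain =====

-- B replaces A's linear scan (one full exponentiation per candidate) by a binary search over the
-- monotone predicate k**nc <= limit with an early-abort multiplication test (objective: faster).

-- ===== PORT A =====
-- models Python's `p ** nc <= limit` for the values A's loop evaluates (p ≥ 1): for nc ≥ 0 it is
-- the integer power; for nc < 0 Python's float p**nc lies in (0, 1], so the comparison holds iff
-- 1 ≤ limit (the float-underflow corner p**nc == 0.0 with limit ≤ 0 is unreachable: the loop has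
-- already broken at p = 1, since 1.0 ≤ limit fails there).
def pvCmpPow (p : Int) (nc : Int) (limit : Int) : Bool :=
  if 0 ≤ nc then p ^ nc.toNat ≤ limit else 1 ≤ limit

def pvLoopA (nc : Int) (limit : Int) (ks : List Int) : List Int → List Int
  | [] => ks
  | p :: rest => if pvCmpPow p nc limit then pvLoopA nc limit (ks ++ [p]) rest else ks

def get_top_ks (nc : Int) (num_candidate_patches : Int) (combination_patch_max : Int) : List Int :=
  -- ks = the loop's accumulated list; top_k = max(ks)
  match PySem.List.max? (pvLoopA nc combination_patch_max [] (PySem.List.pyRange 1 (num_candidate_patches + 1) 1)) (fun x => x) with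
  | none => []  -- Python raises ValueError on max([]); excluded by Pre_
  | some top_k => (PySem.List.pyRange 0 nc 1).map (fun _ => top_k)

-- ===== PORT B =====
def pvFitsGo (base : Int) (limit : Int) (r : Int) : Nat → Bool
  | 0 => true
  | n + 1 => let r' := r * base
             if limit < r' then false else pvFitsGo base limit r' n

def pvFits (base : Int) (nc : Int) (limit : Int) : Bool :=
  if base = 1 then 1 ≤ limit else pvFitsGo base limit 1 nc.toNat

-- the `while lo < hi` loop; each step shrinks hi - lo by at least one, so the
-- initial gap (hi - lo).toNat is enough fuel to run the loop to completion
def pvBSGo (nc : Int) (limit : Int) : Nat → Int → Int → Int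
  | 0, lo, _hi => lo
  | fuel + 1, lo, hi =>
    if lo < hi then
      -- mid = (lo + hi + 1) // 2
      if pvFits (PySem.Int.floordiv (lo + hi + 1) 2) nc limit then
        pvBSGo nc limit fuel (PySem.Int.floordiv (lo + hi + 1) 2) hi
      else
        pvBSGo nc limit fuel lo (PySem.Int.floordiv (lo + hi + 1) 2 - 1)
    else lo

def pvBS (nc : Int) (limit : Int) (lo : Int) (hi : Int) : Int :=
  pvBSGo nc limit (hi - lo).toNat lo hi

def get_top_ks_alt (nc : Int) (num_candidate_patches : Int) (combination_patch_max : Int) : List Int :=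
  List.replicate nc.toNat (pvBS nc combination_patch_max 1 num_candidate_patches)

-- ===== PRECONDITION & SPEC =====
-- Pre_ excludes exactly the inputs on which A raises ValueError (max of the empty list):
-- no candidate (num_candidate_patches < 1) or even patch index 1 exceeds the limit (limit < 1).
def Pre_get_top_ks (nc : Int) (num_candidate_patches : Int) (combination_patch_max : Int) : Prop :=
  1 ≤ num_candidate_patches ∧ 1 ≤ combination_patch_max

instance (nc : Int) (num_candidate_patches : Int) (combination_patch_max : Int) : Decidable (Pre_get_top_ks nc num_candidate_patches combination_patch_max) := by unfold Pre_get_top_ks; infer_instance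

def pvWitness_get_top_ks : Int × Int × Int := (2, 7, 30)

def Spec_get_top_ks (nc : Int) (num_candidate_patches : Int) (combination_patch_max : Int) (out : List Int) : Prop := out = get_top_ks_alt nc num_candidate_patches combination_patch_max
instance (nc : Int) (num_candidate_patches : Int) (combination_patch_max : Int) (out : List Int) : Decidable (Spec_get_top_ks nc num_candidate_patches combination_patch_max out) := by unfold Spec_get_top_ks; infer_instance

-- ===== CLAIM (what is proved, stated in full; the proofs are below) =====
def Claim_equal_get_top_ks : Prop := ∀ (nc : Int) (num_candidate_patches : Int) (combination_patch_max : Int), Dom_get_top_ks nc num_candidate_patches combination_patch_max → Pre_get_top_ks nc num_candidate_patches combination_patch_max → Spec_get_top_ks nc num_candidate_patches combination_patch_max (get_top_ks nc num_candidate_patches combination_patch_max)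

-- ===== LEMMAS AND PROOFS =====

theorem pvMid_bounds (lo hi : Int) (h : lo < hi) :
    lo < PySem.Int.floordiv (lo + hi + 1) 2 ∧ PySem.Int.floordiv (lo + hi + 1) 2 ≤ hi := by
  rw [PySem.Int.floordiv_eq_ediv_of_pos (by omega : (0:Int) < 2)]
  omega


theorem pvWitness_ok : Dom_get_top_ks pvWitness_get_top_ks.1 pvWitness_get_top_ks.2.1 pvWitness_get_top_ks.2.2 ∧ Pre_get_top_ks pvWitness_get_top_ks.1 pvWitness_get_top_ks.2.1 pvWitness_get_top_ks.2.2 := by decide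

-- A's loop is `takeWhile` of the condition over the range.
theorem pvLoopA_takeWhile (nc limit : Int) (ks l : List Int) :
    pvLoopA nc limit ks l = ks ++ l.takeWhile (fun p => pvCmpPow p nc limit) := by
  induction l generalizing ks with
  | nil => simp [pvLoopA]
  | cons p rest ih =>
      by_cases h : pvCmpPow p nc limit = true
      · simp [pvLoopA, List.takeWhile, h, ih]
      · simp [pvLoopA, List.takeWhile, h]

-- the prefix taken from [a..num] is an interval [a..r] whose end r is characterised
theorem pvTakeWhile_range (nc limit : Int) :
    ∀ (n : Nat) (a num : Int), (num - a).toNat ≤ n → a ≤ num → pvCmpPow a nc limit = true →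
    ∃ r, a ≤ r ∧ r ≤ num ∧
      (PySem.List.pyRange a (num + 1) 1).takeWhile (fun p => pvCmpPow p nc limit)
        = PySem.List.pyRange a (r + 1) 1 ∧
      pvCmpPow r nc limit = true ∧ (r = num ∨ pvCmpPow (r + 1) nc limit = false) := by
  intro n
  induction n with
  | zero =>
      intro a num hn ha hcmp
      have : a = num := by omega
      subst this
      refine ⟨a, le_refl a, le_refl a, ?_, hcmp, Or.inl rfl⟩
      rw [PySem.List.pyRange_one_singleton]
      simp [List.takeWhile, hcmp]
  | succ n ih =>
      intro a num hn ha hcmp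
      rw [PySem.List.pyRange_one_cons (by omega : a < num + 1)]
      by_cases heq : a = num
      · subst heq
        rw [PySem.List.pyRange_one_eq_nil (by omega)]
        refine ⟨a, le_refl a, le_refl a, ?_, hcmp, Or.inl rfl⟩
        simp [List.takeWhile, hcmp]
      · by_cases hnext : pvCmpPow (a + 1) nc limit = true
        · obtain ⟨r, h1, h2, h3, h4, h5⟩ := ih (a + 1) num (by omega) (by omega) hnext
          refine ⟨r, by omega, h2, ?_, h4, h5⟩
          rw [List.takeWhile_cons_of_pos (by simpa using hcmp), h3,
              ← PySem.List.pyRange_one_cons (by omega : a < r + 1)]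
        · refine ⟨a, le_refl a, by omega, ?_, hcmp, Or.inr (by simpa using hnext)⟩
          rw [List.takeWhile_cons_of_pos (by simpa using hcmp),
              PySem.List.pyRange_one_cons (by omega : a + 1 < num + 1),
              List.takeWhile_cons_of_neg (by simpa using hnext),
              PySem.List.pyRange_one_singleton]

-- max of an ascending interval is its right end
theorem pvMax_range (a r : Int) (h : a ≤ r) :
    PySem.List.max? (PySem.List.pyRange a (r + 1) 1) (fun x => x) = some r := by
  have hne : PySem.List.pyRange a (r + 1) 1 ≠ [] := by
    intro hnil
    have : r ∈ PySem.List.pyRange a (r + 1) 1 := by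
      rw [PySem.List.mem_pyRange_one]; omega
    simp [hnil] at this
  obtain ⟨m, hm⟩ : ∃ m, PySem.List.max? (PySem.List.pyRange a (r + 1) 1) (fun x => x) = some m := by
    cases hcase : PySem.List.max? (PySem.List.pyRange a (r + 1) 1) (fun x => x) with
    | none => exact absurd ((PySem.List.max?_eq_none_iff _ _).mp hcase) hne
    | some m => exact ⟨m, rfl⟩
  have hmem := PySem.List.max?_mem hm
  rw [PySem.List.mem_pyRange_one] at hmem
  have hle : r ≤ m := by
    have := PySem.List.max?_isMax hm r (by rw [PySem.List.mem_pyRange_one]; omega)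
    simpa using this
  have : m = r := by omega
  rw [hm, this]

-- the early-abort multiplication loop decides r * base^n ≤ limit
theorem pvFitsGo_iff (base limit : Int) (hb : 1 ≤ base) :
    ∀ (n : Nat) (r : Int), 1 ≤ r → r ≤ limit →
      (pvFitsGo base limit r n = true ↔ r * base ^ n ≤ limit) := by
  intro n
  induction n with
  | zero => intro r h1 h2; simp [pvFitsGo]; omega
  | succ n ih =>
      intro r h1 h2
      by_cases habort : limit < r * base
      · have hpow : r * base ≤ r * base ^ (n + 1) := by
          have h1n : (1:Int) ≤ base ^ n := one_le_pow₀ hb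
          calc r * base = r * base * 1 := by ring
            _ ≤ r * base * base ^ n := by
                apply mul_le_mul_of_nonneg_left h1n; positivity
            _ = r * base ^ (n + 1) := by ring
        have hfalse : pvFitsGo base limit r (n + 1) = false := by
          simp [pvFitsGo, habort]
        rw [hfalse]
        simp
        exact lt_of_lt_of_le habort hpow
      · have hle : r * base ≤ limit := by omega
        have h1' : 1 ≤ r * base := by nlinarith
        rw [show pvFitsGo base limit r (n + 1) = pvFitsGo base limit (r * base) n by
              simp [pvFitsGo, not_lt.mpr hle],
            ih (r * base) h1' hle,
            show r * base * base ^ n = r * base ^ (n + 1) by ring]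

theorem pvFits_iff (base nc limit : Int) (hb : 1 ≤ base) (hl : 1 ≤ limit) :
    (pvFits base nc limit = true ↔ base ^ nc.toNat ≤ limit) := by
  unfold pvFits
  by_cases h1 : base = 1
  · subst h1; simp
  · have hb2 : 2 ≤ base := by omega
    rw [if_neg h1, pvFitsGo_iff base limit hb nc.toNat 1 (le_refl 1) hl]
    simp

-- binary-search invariant: result is in [lo, hi], satisfies the predicate, and either
-- equals hi or its successor fails
theorem pvBSGo_spec (nc limit : Int) (hl : 1 ≤ limit) :
    ∀ (fuel : Nat) (lo hi : Int), (hi - lo).toNat ≤ fuel → 1 ≤ lo → lo ≤ hi →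
      lo ^ nc.toNat ≤ limit →
      lo ≤ pvBSGo nc limit fuel lo hi ∧ pvBSGo nc limit fuel lo hi ≤ hi ∧
      (pvBSGo nc limit fuel lo hi) ^ nc.toNat ≤ limit ∧
      (pvBSGo nc limit fuel lo hi = hi ∨ ¬ (pvBSGo nc limit fuel lo hi + 1) ^ nc.toNat ≤ limit) := by
  intro fuel
  induction fuel with
  | zero =>
      intro lo hi hn h1 hlh hp
      have hlohi : lo = hi := by omega
      rw [show pvBSGo nc limit 0 lo hi = lo from rfl]
      exact ⟨le_refl _, by omega, hp, Or.inl hlohi⟩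
  | succ n ih =>
      intro lo hi hn h1 hlh hp
      by_cases hlt : lo < hi
      · rw [pvBSGo, if_pos hlt]
        have hmid := pvMid_bounds lo hi hlt
        set mid := PySem.Int.floordiv (lo + hi + 1) 2 with hmiddef
        by_cases hfit : pvFits mid nc limit = true
        · have hpm : mid ^ nc.toNat ≤ limit :=
            (pvFits_iff mid nc limit (by omega) hl).mp hfit
          have := ih mid hi (by omega) (by omega) (by omega) hpm
          rw [if_pos hfit]
          exact ⟨by omega, this.2.1, this.2.2.1, this.2.2.2⟩
        · have hpm : ¬ mid ^ nc.toNat ≤ limit := by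
            intro h; exact hfit ((pvFits_iff mid nc limit (by omega) hl).mpr h)
          have := ih lo (mid - 1) (by omega) h1 (by omega) hp
          rw [if_neg hfit]
          refine ⟨this.1, by omega, this.2.2.1, ?_⟩
          rcases this.2.2.2 with h | h
          · right; rw [h]; simpa using hpm
          · right; exact h
      · rw [pvBSGo, if_neg hlt]
        have hlohi : lo = hi := by omega
        exact ⟨le_refl _, by omega, hp, Or.inl hlohi⟩

theorem pvBS_spec (nc limit : Int) (hl : 1 ≤ limit) (lo hi : Int)
    (h1 : 1 ≤ lo) (hlh : lo ≤ hi) (hp : lo ^ nc.toNat ≤ limit) :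
    lo ≤ pvBS nc limit lo hi ∧ pvBS nc limit lo hi ≤ hi ∧
    (pvBS nc limit lo hi) ^ nc.toNat ≤ limit ∧
    (pvBS nc limit lo hi = hi ∨ ¬ (pvBS nc limit lo hi + 1) ^ nc.toNat ≤ limit) :=
  pvBSGo_spec nc limit hl (hi - lo).toNat lo hi (le_refl _) h1 hlh hp

-- closed maps of pyRange 0 nc 1 are replicates
theorem pvMap_const_range (nc : Int) (c : Int) :
    (PySem.List.pyRange 0 nc 1).map (fun _ => c) = List.replicate nc.toNat c := by
  rw [List.eq_replicate_iff]
  constructor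
  · simp [PySem.List.length_pyRange_one]
  · intro b hb
    simp only [List.mem_map] at hb
    obtain ⟨x, _, hx⟩ := hb
    omega

-- ===== VERDICT (by name: the statement is the Claim_ definition above) =====
theorem get_top_ks_spec : Claim_equal_get_top_ks := by
  unfold Claim_equal_get_top_ks
  intro nc num limit _ hpre
  obtain ⟨hnum, hlim⟩ := hpre
  unfold Spec_get_top_ks get_top_ks get_top_ks_alt
  by_cases hnc : nc ≤ 0
  · -- both sides are []
    have h1 : PySem.List.pyRange 0 nc 1 = [] := PySem.List.pyRange_one_eq_nil (by omega)
    have h2 : nc.toNat = 0 := by omega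
    cases hmax : PySem.List.max? (pvLoopA nc limit [] (PySem.List.pyRange 1 (num + 1) 1)) (fun x => x) with
    | none => simp [h2]
    | some t => simp [h1, h2]
  · have hnc' : 1 ≤ nc := by omega
    have hcmp1 : pvCmpPow 1 nc limit = true := by
      unfold pvCmpPow; rw [if_pos (by omega)]; simpa
    obtain ⟨r, hr1, hr2, hr3, hr4, hr5⟩ :=
      pvTakeWhile_range nc limit (num - 1).toNat 1 num (by omega) hnum hcmp1
    rw [pvLoopA_takeWhile, List.nil_append, hr3]
    simp only [pvMax_range 1 r hr1]
    -- B's side: binary search lands on the same r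
    have hp1 : (1:Int) ^ nc.toNat ≤ limit := by simpa
    obtain ⟨hb1, hb2, hb3, hb4⟩ :=
      pvBS_spec nc limit hlim 1 num (le_refl 1) hnum hp1
    set s := pvBS nc limit 1 num with hsdef
    have hPr : r ^ nc.toNat ≤ limit := by
      unfold pvCmpPow at hr4; rw [if_pos (by omega)] at hr4; simpa using hr4
    have hrs : r = s := by
      by_contra hne
      rcases lt_or_gt_of_ne hne with hlt | hgt
      · -- r < s : then r ≠ num, so (r+1) fails, but r+1 ≤ s satisfies
        have hrnum : r ≠ num := by omega
        have hfail : pvCmpPow (r + 1) nc limit = false := hr5.resolve_left hrnum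
        unfold pvCmpPow at hfail; rw [if_pos (by omega)] at hfail
        have : (r + 1) ^ nc.toNat ≤ limit := by
          calc (r + 1) ^ nc.toNat ≤ s ^ nc.toNat := pow_le_pow_left₀ (by omega) (by omega) _
            _ ≤ limit := hb3
        simp [this] at hfail
      · -- s < r : symmetric
        have hsnum : s ≠ num := by omega
        have hfail : ¬ (s + 1) ^ nc.toNat ≤ limit := hb4.resolve_left hsnum
        exact hfail (by
          calc (s + 1) ^ nc.toNat ≤ r ^ nc.toNat := pow_le_pow_left₀ (by omega) (by omega) _
            _ ≤ limit := hPr)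
    simp only [pvMap_const_range, hrs]
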